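-- pv_equiv track=rewrite | github.com/danielss0n/sequenciador | app/App.py | mover_pecas_em_progresso
-- ===== SOURCE A (Python) =====
-- def mover_pecas_em_progresso(sequencia):
--     em_progresso = []
--     aguardando = []
--     for key, item in sequencia.items():
--         if item['em_progresso']:
--             em_progresso.append((key, item))
--         else:
--             aguardando.append((key, item))
--
--     nova_sequencia = {key: item for key, item in em_progresso}
--     nova_sequencia.update({key: item for key, item in aguardando})
--     return nova_sequencia
-- ===== SOURCE B (Python) =====
-- def mover_pecas_em_progresso(sequencia):
--     # one stable sort: in-progress items (key False) come first, order within groups preserved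
--     return dict(sorted(sequencia.items(), key=lambda kv: not kv[1]['em_progresso']))
-- ===== Notes on version B (the rewrite author's own statement) =====
-- stated objective: idiomatic
-- what changed: Replaces A's two-bucket partition loop plus dict-comprehension-and-update rebuild with a single stable sort of the items on the boolean key (not em_progresso), so in-progress entries come first and each group keeps its original order.
import Mathlib
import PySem

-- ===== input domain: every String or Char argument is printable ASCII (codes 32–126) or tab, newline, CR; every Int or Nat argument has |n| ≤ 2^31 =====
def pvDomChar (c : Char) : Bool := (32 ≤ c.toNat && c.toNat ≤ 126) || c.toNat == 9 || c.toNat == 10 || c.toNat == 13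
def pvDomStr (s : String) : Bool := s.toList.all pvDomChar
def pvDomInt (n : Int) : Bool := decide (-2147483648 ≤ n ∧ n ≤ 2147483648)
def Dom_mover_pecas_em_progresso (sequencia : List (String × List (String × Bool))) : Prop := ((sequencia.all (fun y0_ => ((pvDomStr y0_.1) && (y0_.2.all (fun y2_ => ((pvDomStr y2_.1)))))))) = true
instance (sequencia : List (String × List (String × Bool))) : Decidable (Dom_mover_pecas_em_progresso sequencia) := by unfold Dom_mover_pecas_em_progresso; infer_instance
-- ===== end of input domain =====

-- B replaces A's two-bucket partition + dict rebuild by ONE stable sort on the boolean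
-- key (not em_progresso), relying on sort stability for the within-group order (objective: idiomatic).

-- item['em_progresso'] : dict lookup on the inner association list (first match; none = KeyError, excluded by Pre_)
def pvLookupProg (item : List (String × Bool)) : Option Bool :=
  (PySem.Dict.mk item).get? "em_progresso"

-- ===== PORT A =====
-- the for-loop: two accumulating buckets (em_progresso, aguardando), appended to in order
def mover_pecas_em_progresso (sequencia : List (String × List (String × Bool))) : List (String × List (String × Bool)) :=
  let part := sequencia.foldl
    (fun (acc : List (String × List (String × Bool)) × List (String × List (String × Bool))) kv =>
      if (pvLookupProg kv.2).getD false then (acc.1 ++ [kv], acc.2) else (acc.1, acc.2 ++ [kv]))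
    ([], [])
  -- nova_sequencia = {k: v for em_progresso}; nova_sequencia.update({k: v for aguardando})
  let nova := PySem.Dict.ofList part.1
  ((nova.update (PySem.Dict.ofList part.2).items)).items

-- ===== PORT B =====
def mover_pecas_em_progresso_alt (sequencia : List (String × List (String × Bool))) : List (String × List (String × Bool)) :=
  (PySem.Dict.ofList
    (PySem.List.sorted sequencia (fun kv => !((pvLookupProg kv.2).getD false)) false)).items

-- ===== PRECONDITION & SPEC =====
-- Pre_ excludes (i) items without the key 'em_progresso' (Python A raises KeyError there, and B raises too),
-- and (ii) association lists whose outer keys repeat, which do not represent any Python dict input.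
def Pre_mover_pecas_em_progresso (sequencia : List (String × List (String × Bool))) : Prop :=
  (sequencia.map (·.1)).Nodup ∧
  ∀ kv ∈ sequencia, ((PySem.Dict.mk kv.2).get? "em_progresso").isSome
instance (sequencia : List (String × List (String × Bool))) : Decidable (Pre_mover_pecas_em_progresso sequencia) := by unfold Pre_mover_pecas_em_progresso; infer_instance

def pvWitness_mover_pecas_em_progresso : (List (String × List (String × Bool))) :=
  [("a", [("em_progresso", false)]), ("b", [("em_progresso", true)])]

def Spec_mover_pecas_em_progresso (sequencia : List (String × List (String × Bool))) (out : List (String × List (String × Bool))) : Prop := out = mover_pecas_em_progresso_alt sequencia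
instance (sequencia : List (String × List (String × Bool))) (out : List (String × List (String × Bool))) : Decidable (Spec_mover_pecas_em_progresso sequencia out) := by unfold Spec_mover_pecas_em_progresso; infer_instance

-- ===== CLAIM (what is proved, stated in full; the proofs are below) =====
def Claim_equal_mover_pecas_em_progresso : Prop := ∀ (sequencia : List (String × List (String × Bool))), Dom_mover_pecas_em_progresso sequencia → Pre_mover_pecas_em_progresso sequencia → Spec_mover_pecas_em_progresso sequencia (mover_pecas_em_progresso sequencia)

-- ===== LEMMAS AND PROOFS =====

-- the boolean sort key used by B
def pvKey (kv : String × List (String × Bool)) : Bool := !((pvLookupProg kv.2).getD false)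

-- insertBy skips over a prefix none of whose elements x goes before
lemma insertBy_append_of_not_before {α : Type} (before : α → α → Bool) (x : α)
    (A B : List α) (hA : ∀ a ∈ A, before x a = false) :
    PySem.List.insertBy before x (A ++ B) = A ++ PySem.List.insertBy before x B := by
  induction A with
  | nil => simp
  | cons a t ih =>
    have ha : before x a = false := hA a (by simp)
    simp [PySem.List.insertBy, ha, ih (fun b hb => hA b (by simp [hb]))]

-- the insertion-sort fold with a Bool key keeps the accumulator partitioned:
-- false-key elements first, true-key elements after, each group in arrival order
lemma foldl_insertBy_bool (xs : List (String × List (String × Bool)))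
    (A B : List (String × List (String × Bool)))
    (hA : ∀ a ∈ A, pvKey a = false) (hB : ∀ b ∈ B, pvKey b = true) :
    xs.foldl (fun acc x => PySem.List.insertBy (fun a b => decide (pvKey a < pvKey b)) x acc) (A ++ B)
      = (A ++ xs.filter (fun x => pvKey x == false)) ++ (B ++ xs.filter (fun x => pvKey x == true)) := by
  induction xs generalizing A B with
  | nil => simp
  | cons x t ih =>
    by_cases hx : pvKey x = true
    · have hstep : PySem.List.insertBy (fun a b => decide (pvKey a < pvKey b)) x (A ++ B)
          = (A ++ B) ++ [x] := by
        apply PySem.List.insertBy_of_forall_not_before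
        intro y hy
        rcases List.mem_append.mp hy with h | h
        · simp [hx, hA y h]
        · simp [hx, hB y h]
      have := ih A (B ++ [x]) hA (by
        intro b hb; rcases List.mem_append.mp hb with h | h
        · exact hB b h
        · simp at h; simp [h, hx])
      simp only [List.foldl_cons, hstep, List.append_assoc] at this ⊢
      rw [this]
      simp [hx]
    · have hx' : pvKey x = false := by simpa using hx
      have hstep : PySem.List.insertBy (fun a b => decide (pvKey a < pvKey b)) x (A ++ B)
          = (A ++ [x]) ++ B := by
        rw [insertBy_append_of_not_before _ _ A B (fun a ha => by simp [hx', hA a ha])]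
        cases B with
        | nil => simp [PySem.List.insertBy]
        | cons b bt =>
          have hb : pvKey b = true := hB b (by simp)
          simp [PySem.List.insertBy, hx', hb]
      have := ih (A ++ [x]) B (by
        intro a ha; rcases List.mem_append.mp ha with h | h
        · exact hA a h
        · simp at h; simp [h, hx']) hB
      simp only [List.foldl_cons, hstep] at this ⊢
      rw [this]
      simp [hx']

-- B's stable sort on the Bool key IS partition: false keys (in progress) first, then true keys
lemma sorted_bool_partition (xs : List (String × List (String × Bool))) :
    PySem.List.sorted xs pvKey false
      = xs.filter (fun x => pvKey x == false) ++ xs.filter (fun x => pvKey x == true) := by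
  have := foldl_insertBy_bool xs [] [] (by simp) (by simp)
  simpa [PySem.List.sorted_eq_foldl_insertBy] using this

-- A's two-bucket loop computes the two filters
lemma foldl_partition (xs : List (String × List (String × Bool)))
    (l1 l2 : List (String × List (String × Bool))) :
    xs.foldl
      (fun (acc : List (String × List (String × Bool)) × List (String × List (String × Bool))) kv =>
        if (pvLookupProg kv.2).getD false then (acc.1 ++ [kv], acc.2) else (acc.1, acc.2 ++ [kv]))
      (l1, l2)
      = (l1 ++ xs.filter (fun x => pvKey x == false), l2 ++ xs.filter (fun x => pvKey x == true)) := by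
  induction xs generalizing l1 l2 with
  | nil => simp
  | cons x t ih =>
    by_cases hx : (pvLookupProg x.2).getD false
    · have hk : pvKey x = false := by simp [pvKey, hx]
      simp [List.foldl_cons, hx, ih, hk]
    · have hk : pvKey x = true := by simp [pvKey, hx]
      simp [List.foldl_cons, hx, ih, hk]

-- building a dict by inserting pairs with fresh distinct keys just lists the pairs
lemma items_update_fresh (d : PySem.Dict String (List (String × Bool)))
    (l : List (String × List (String × Bool)))
    (hfresh : ∀ p ∈ l, d.contains p.1 = false) (hnd : (l.map (·.1)).Nodup) :
    (d.update l).items = d.items ++ l := by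
  have h := PySem.Dict.items_foldl_insert_fresh l (·.1) (·.2) d hfresh hnd
  simpa [PySem.Dict.update] using h

lemma ofList_items_of_nodup (l : List (String × List (String × Bool)))
    (hnd : (l.map (·.1)).Nodup) :
    (PySem.Dict.ofList l).items = l := by
  have h := items_update_fresh PySem.Dict.empty l (by intro p _; rfl) hnd
  simpa [PySem.Dict.ofList] using h

-- ===== VERDICT (by name: the statement is the Claim_ definition above) =====
theorem mover_pecas_em_progresso_spec : Claim_equal_mover_pecas_em_progresso := by
  intro xs _ hpre
  obtain ⟨hnd, _⟩ := hpre
  unfold Spec_mover_pecas_em_progresso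
  unfold mover_pecas_em_progresso mover_pecas_em_progresso_alt
  rw [foldl_partition xs [] []]
  simp only [List.nil_append]
  set em := xs.filter (fun x => pvKey x == false) with hem
  set ag := xs.filter (fun x => pvKey x == true) with hag
  have hperm : (em ++ ag).Perm xs := by
    simpa [hem, hag] using List.filter_append_perm (fun x => pvKey x == false) xs
  have hkeysnd : ((em ++ ag).map (·.1)).Nodup :=
    ((hperm.map (·.1)).nodup_iff).mpr hnd
  have hemnd : (em.map (·.1)).Nodup := by
    simpa using (List.nodup_append.mp (by simpa using hkeysnd)).1
  have hagnd : (ag.map (·.1)).Nodup := by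
    simpa using (List.nodup_append.mp (by simpa using hkeysnd)).2.1
  have hdisj : ∀ p ∈ ag, p.1 ∉ em.map (·.1) := by
    intro p hp hmem
    have hd := (List.nodup_append.mp (by simpa using hkeysnd)).2.2
    exact hd p.1 hmem p.1 (List.mem_map_of_mem hp) rfl
  -- B side: sorted = em ++ ag, all keys distinct
  have hkey : (fun kv : String × List (String × Bool) => !((pvLookupProg kv.2).getD false)) = pvKey := rfl
  rw [hkey]
  have hB : (PySem.Dict.ofList (PySem.List.sorted xs pvKey false)).items = em ++ ag := by
    rw [sorted_bool_partition, ← hem, ← hag]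
    exact ofList_items_of_nodup _ hkeysnd
  -- A side: ofList em = em, then updating with ag appends
  have hAem : (PySem.Dict.ofList em).items = em := ofList_items_of_nodup em hemnd
  have hAag : (PySem.Dict.ofList ag).items = ag := ofList_items_of_nodup ag hagnd
  have hfresh : ∀ p ∈ ag, (PySem.Dict.ofList em).contains p.1 = false := by
    intro p hp
    have hnm : p.1 ∉ List.map (fun x => x.1) em := hdisj p hp
    simp only [PySem.Dict.contains, hAem, List.any_eq_false]
    intro q hq
    have hne : q.1 ≠ p.1 := fun h => hnm (h ▸ List.mem_map_of_mem (f := fun x => x.1) hq)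
    simpa using hne
  rw [hAag]
  rw [items_update_fresh _ ag hfresh hagnd, hAem, hB]
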